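-- pv_equiv track=rewrite | github.com/lbliii/bengal | bengal/rendering/parsers/patitas/lexer.py | _is_complete_html_tag
-- ===== SOURCE A (Python) =====
-- def _is_complete_html_tag(content: str) -> bool:
--     """Check if content is a complete HTML open/close tag.
--
--     Type 7 HTML blocks require a complete tag that's the only content on line.
--     """
--     content = content.rstrip()
--     if not content or content[0] != "<":
--         return False
--
--     # Simple check: starts with <, ends with >, has valid tag structure
--     if not content.endswith(">"):
--         return False
--
--     # Must have at least <x> (3 chars)
--     if len(content) < 3:
--         return False
--
--     # Check for closing tag </x>
--     if content[1] == "/":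
--         # Closing tag: must have letter after /
--         if len(content) < 4:
--             return False
--         if not content[2].isalpha():
--             return False
--         # Check tag name is valid
--         pos = 2
--         while pos < len(content) - 1 and (content[pos].isalnum() or content[pos] == "-"):
--             pos += 1
--         # Must end with just > or whitespace then >
--         rest = content[pos:-1]
--         return rest.strip() == ""
--
--     # Opening tag: <tagname ...>
--     if not content[1].isalpha():
--         return False
--
--     # Check we have a valid tag name and structure
--     pos = 1
--     while pos < len(content) and (content[pos].isalnum() or content[pos] == "-"):
--         pos += 1
--
--     # Check it's a valid tag (has attributes or just ends)
--     rest = content[pos:-1]  # Everything between tag name and >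
--
--     # Self-closing tags are valid
--     if rest.endswith("/"):
--         rest = rest[:-1]
--
--     # The rest should be valid attributes or empty
--     # For simplicity, just check it doesn't look like paragraph text
--     return True
-- ===== SOURCE B (Python) =====
-- def _is_complete_html_tag(content: str) -> bool:
--     # Single-pass DFA over the rstripped text; accepting states: DONE (closing
--     # tag fully matched) and OPEN_GT (opening tag ending in the closing angle bracket).
--     START, LT, SLASH, NAME, WS, DONE, OPEN_OTHER, OPEN_GT, REJECT = range(9)
--     state = START
--     for ch in content.rstrip():
--         if state == START:
--             state = LT if ch == "<" else REJECT
--         elif state == LT: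
--             if ch == "/":
--                 state = SLASH
--             elif ch.isalpha():
--                 state = OPEN_OTHER
--             else:
--                 state = REJECT
--         elif state == SLASH:
--             state = NAME if ch.isalpha() else REJECT
--         elif state == NAME:
--             if ch.isalnum() or ch == "-":
--                 state = NAME
--             elif ch.isspace():
--                 state = WS
--             elif ch == ">":
--                 state = DONE
--             else:
--                 state = REJECT
--         elif state == WS:
--             if ch.isspace():
--                 state = WS
--             elif ch == ">":
--                 state = DONE
--             else:
--                 state = REJECT
--         elif state == DONE:
--             state = REJECT
--         elif state == OPEN_OTHER or state == OPEN_GT: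
--             state = OPEN_GT if ch == ">" else OPEN_OTHER
--         else:
--             state = REJECT
--     return state == DONE or state == OPEN_GT
-- ===== Notes on version B (the rewrite author's own statement) =====
-- stated objective: alternative
-- what changed: Replaced A's guard chain with an index-walking tag-name scan and a strip-of-the-remainder check by a single left-to-right finite-state machine (9 explicit states) run once over the rstripped string, accepting in the closing-tag-done state or the opening-tag state whose final character was the closing angle bracket.
import Mathlib
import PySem

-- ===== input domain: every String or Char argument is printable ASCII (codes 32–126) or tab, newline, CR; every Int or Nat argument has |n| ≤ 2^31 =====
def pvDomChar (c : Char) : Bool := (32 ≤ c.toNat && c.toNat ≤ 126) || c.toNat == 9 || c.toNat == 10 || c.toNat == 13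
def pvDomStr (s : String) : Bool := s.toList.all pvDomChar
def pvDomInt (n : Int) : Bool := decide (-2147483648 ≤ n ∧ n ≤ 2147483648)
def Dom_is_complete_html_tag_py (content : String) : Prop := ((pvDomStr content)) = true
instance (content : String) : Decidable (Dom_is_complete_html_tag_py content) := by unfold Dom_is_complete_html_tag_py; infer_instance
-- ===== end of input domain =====

-- B replaces A's guard chain + index-walking tag-name scan + strip-of-remainder check by a single
-- left-to-right finite-state machine over the rstripped text; objective: alternative (no speed claim).

-- ===== PORT A =====
-- A's while loop: `while pos < stop and (content[pos].isalnum() or content[pos] == "-"): pos += 1`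
def pvTagScan (cs : List Char) (stop : Nat) (pos : Nat) : Nat :=
  if _h : pos < stop then
    if PySem.Chars.isalnum (cs.getD pos ' ') || cs.getD pos ' ' == '-' then
      pvTagScan cs stop (pos + 1)
    else pos
  else pos
termination_by stop - pos

def is_complete_html_tag_py (content : String) : Bool :=
  let cs := PySem.Chars.rstrip content.toList
  if cs.length = 0 then false                                    -- if not content
  else if !(cs.getD 0 ' ' == '<') then false                     -- or content[0] != "<"
  else if !(PySem.Chars.endswith cs ['>']) then false            -- not content.endswith(">")
  else if cs.length < 3 then false                               -- len(content) < 3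
  else if cs.getD 1 ' ' == '/' then                              -- closing tag
    if cs.length < 4 then false
    else if !(PySem.Chars.isalpha (cs.getD 2 ' ')) then false
    else
      let pos := pvTagScan cs (cs.length - 1) 2
      let rest := PySem.List.slice cs (some (pos : Int)) (some (-1))
      (PySem.Chars.strip rest == [])                             -- rest.strip() == ""
  else if !(PySem.Chars.isalpha (cs.getD 1 ' ')) then false      -- opening tag
  else
    -- A also scans the name and slices `rest` here, but discards both and returns True
    -- unconditionally; the dead computation is omitted.
    true

-- ===== PORT B =====
-- B is a deterministic finite automaton run once over the rstripped characters.
def pvGood (ch : Char) : Bool := PySem.Chars.isalnum ch || ch == '-'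

inductive PvSt where
  | start | lt | slash | name | ws | done | openOther | openGt | reject
deriving DecidableEq, Repr

def pvStep (s : PvSt) (ch : Char) : PvSt :=
  match s with
  | .start => if ch == '<' then .lt else .reject
  | .lt => if ch == '/' then .slash
           else if PySem.Chars.isalpha ch then .openOther else .reject
  | .slash => if PySem.Chars.isalpha ch then .name else .reject
  | .name => if pvGood ch then .name
             else if PySem.Chars.isspace ch then .ws
             else if ch == '>' then .done else .reject
  | .ws => if PySem.Chars.isspace ch then .ws
           else if ch == '>' then .done else .reject
  | .done => .reject
  | .openOther => if ch == '>' then .openGt else .openOther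
  | .openGt => if ch == '>' then .openGt else .openOther
  | .reject => .reject

def pvAcc (s : PvSt) : Bool := s == .done || s == .openGt

def is_complete_html_tag_py_alt (content : String) : Bool :=
  pvAcc ((PySem.Chars.rstrip content.toList).foldl pvStep .start)

-- ===== PRECONDITION & SPEC =====
def Spec_is_complete_html_tag_py (content : String) (out : Bool) : Prop := out = is_complete_html_tag_py_alt content
instance (content : String) (out : Bool) : Decidable (Spec_is_complete_html_tag_py content out) := by unfold Spec_is_complete_html_tag_py; infer_instance

-- ===== CLAIM (what is proved, stated in full; the proofs are below) =====
def Claim_equal_is_complete_html_tag_py : Prop := ∀ (content : String), Dom_is_complete_html_tag_py content → Spec_is_complete_html_tag_py content (is_complete_html_tag_py content)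

-- ===== LEMMAS AND PROOFS =====

-- character-class facts (true for every Char under PySem's tables)
lemma pv_space_not_good (c : Char) (h : PySem.Chars.isspace c = true) :
    pvGood c = false := by
  have hA : 'A'.val.toNat = 65 := rfl
  have hZ : 'Z'.val.toNat = 90 := rfl
  have ha : 'a'.val.toNat = 97 := rfl
  have hz : 'z'.val.toNat = 122 := rfl
  have h0 : '0'.val.toNat = 48 := rfl
  have h9 : '9'.val.toNat = 57 := rfl
  unfold pvGood
  rw [Bool.or_eq_false_iff]
  refine ⟨?_, ?_⟩
  · simp only [PySem.Chars.isspace, PySem.Chars.isalnum, PySem.Chars.isalpha, PySem.Chars.isdigit,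
      PySem.Chars.isupper, PySem.Chars.islower, Char.le_def, UInt32.le_iff_toNat_le, Char.toNat,
      Bool.or_eq_true, Bool.and_eq_true, decide_eq_true_eq, Bool.or_eq_false_iff,
      Bool.and_eq_false_iff, decide_eq_false_iff_not, not_le, hA, hZ, ha, hz, h0, h9] at *
    omega
  · rcases Bool.eq_false_or_eq_true (c == '-') with hb | hb
    · have : c = '-' := by simpa using hb
      subst this
      exact absurd h (by decide)
    · exact hb

lemma pv_alpha_good (c : Char) (h : PySem.Chars.isalpha c = true) :
    pvGood c = true := by
  simp [pvGood, PySem.Chars.isalnum, h]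

-- strip l == [] iff l is all whitespace
lemma pv_strip_nil_iff (l : List Char) :
    (PySem.Chars.strip l == []) = l.all PySem.Chars.isspace := by
  have h1 : (PySem.Chars.strip l = []) ↔ l.all PySem.Chars.isspace = true := by
    unfold PySem.Chars.strip PySem.Chars.rstrip PySem.Chars.lstrip
    rw [List.reverse_eq_nil_iff, List.dropWhile_eq_nil_iff, List.all_eq_true]
    constructor
    · intro hall c hc
      have hd : ∀ x ∈ l.dropWhile PySem.Chars.isspace, PySem.Chars.isspace x := by
        intro x hx
        exact hall x (List.mem_reverse.mpr hx)
      by_cases hne : l.dropWhile PySem.Chars.isspace = []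
      · exact (List.dropWhile_eq_nil_iff).mp hne c hc
      · exact absurd (hd _ (List.head_mem hne))
          (by simpa using List.head_dropWhile_not (p := PySem.Chars.isspace) (l := l) hne)
    · intro hall x hx
      have hnil : l.dropWhile PySem.Chars.isspace = [] := by
        rw [List.dropWhile_eq_nil_iff]; exact hall
      rw [hnil] at hx
      simp at hx
  rcases Bool.eq_false_or_eq_true (l.all PySem.Chars.isspace) with hb | hb <;>
    simp [h1, hb]

-- the scan loop of A
lemma pv_tagScan_le (cs : List Char) (stop pos : Nat) (h : pos ≤ stop) :
    pvTagScan cs stop pos ≤ stop := by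
  fun_induction pvTagScan cs stop pos with
  | case1 pos hlt hgood ih => exact ih (by omega)
  | case2 pos hlt hgood => omega
  | case3 pos hlt => omega

lemma pv_tagScan_drop (cs : List Char) (stop pos : Nat) (hstop : stop ≤ cs.length) (h : pos ≤ stop) :
    (cs.take stop).drop (pvTagScan cs stop pos)
      = ((cs.take stop).drop pos).dropWhile pvGood := by
  fun_induction pvTagScan cs stop pos with
  | case1 pos hlt hgood ih =>
    have hpl : pos < cs.length := lt_of_lt_of_le hlt hstop
    have hlen : pos < (cs.take stop).length := by simp; omega
    have hdrop : (cs.take stop).drop pos = (cs.take stop)[pos] :: (cs.take stop).drop (pos + 1) :=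
      List.drop_eq_getElem_cons hlen
    rw [hdrop, List.dropWhile_cons]
    have hget : (cs.take stop)[pos] = cs.getD pos ' ' := by
      rw [List.getElem_take, List.getD_eq_getElem _ _ hpl]
    rw [hget, show pvGood (cs.getD pos ' ') = true from hgood, if_pos rfl]
    exact ih (by omega)
  | case2 pos hlt hgood =>
    have hpl : pos < cs.length := lt_of_lt_of_le hlt hstop
    have hlen : pos < (cs.take stop).length := by simp; omega
    have hdrop : (cs.take stop).drop pos = (cs.take stop)[pos] :: (cs.take stop).drop (pos + 1) :=
      List.drop_eq_getElem_cons hlen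
    rw [hdrop, List.dropWhile_cons]
    simp only [Bool.not_eq_true] at hgood
    have hget : (cs.take stop)[pos] = cs.getD pos ' ' := by
      rw [List.getElem_take, List.getD_eq_getElem _ _ hpl]
    rw [hget, show pvGood (cs.getD pos ' ') = false from hgood]
    simp
  | case3 pos hlt =>
    have hps : pos = stop := by omega
    subst hps
    simp

-- content[p:-1] as take/drop
lemma pv_slice_neg_one (cs : List Char) (p : Nat) (hp : p ≤ cs.length - 1) (h : cs ≠ []) :
    PySem.List.slice cs (some (p : Int)) (some (-1)) = (cs.take (cs.length - 1)).drop p := by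
  have hlen : 1 ≤ cs.length := List.length_pos_iff.mpr h
  simp only [PySem.List.slice, PySem.List.clampIdx]
  rw [if_neg (show ¬((p : Int) < 0) by omega), if_pos (show (-1 : Int) < 0 by norm_num),
    if_neg (show ¬((cs.length : Int) + (-1) < 0) by omega)]
  have h1 : (p : Int).toNat = p := by simp
  have h3 : ((cs.length : Int) + (-1)).toNat = cs.length - 1 := by omega
  rw [h1, h3, Nat.min_eq_left (by omega), List.drop_take]

lemma pv_endswith_last? (l : List Char) (x : Char) :
    PySem.Chars.endswith l [x] = (l.getLast? == some x) := by
  have h1 : PySem.Chars.endswith l [x] = true ↔ (l.getLast? == some x) = true := by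
    rw [PySem.Chars.endswith_iff, beq_iff_eq, List.getLast?_eq_some_iff]
    constructor
    · rintro ⟨u, hu⟩
      exact ⟨u, hu.symm⟩
    · rintro ⟨u, hu⟩
      exact ⟨u, hu.symm⟩
  rcases Bool.eq_false_or_eq_true (l.getLast? == some x) with hb | hb <;>
    simp [hb] at h1 ⊢ <;> simp [h1]

-- DFA state lemmas
lemma pv_foldl_reject (l : List Char) : List.foldl pvStep PvSt.reject l = PvSt.reject := by
  induction l with
  | nil => rfl
  | cons a xs ih => simpa [pvStep] using ih

lemma pv_acc_done (l : List Char) : pvAcc (List.foldl pvStep PvSt.done l) = l.isEmpty := by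
  cases l with
  | nil => rfl
  | cons a xs => simp [pvStep, pv_foldl_reject, pvAcc]

lemma pv_ws_acc (l : List Char) :
    pvAcc (List.foldl pvStep PvSt.ws l) = true ↔
      ∃ w, l = w ++ ['>'] ∧ ∀ x ∈ w, PySem.Chars.isspace x = true := by
  induction l with
  | nil =>
    simp [pvAcc]
  | cons a xs ih =>
    by_cases hsp : PySem.Chars.isspace a = true
    · have hstep : pvStep PvSt.ws a = PvSt.ws := by simp [pvStep, hsp]
      rw [List.foldl_cons, hstep, ih]
      constructor
      · rintro ⟨w, hw, hws⟩
        refine ⟨a :: w, by simp [hw], ?_⟩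
        intro x hx
        rcases List.mem_cons.mp hx with h | h
        · subst h; exact hsp
        · exact hws x h
      · rintro ⟨w, hw, hws⟩
        cases w with
        | nil =>
          simp at hw
          rw [hw.1] at hsp
          exact absurd hsp (by decide)
        | cons w0 w' =>
          simp only [List.cons_append, List.cons.injEq] at hw
          exact ⟨w', hw.2, fun x hx => hws x (by simp [hx])⟩
    · by_cases hgt : (a == '>') = true
      · have haeq : a = '>' := by simpa using hgt
        subst haeq
        have hstep : pvStep PvSt.ws '>' = PvSt.done := by
          simp [pvStep, show PySem.Chars.isspace '>' = false by decide]
        rw [List.foldl_cons, hstep, pv_acc_done]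
        constructor
        · intro h
          have : xs = [] := by simpa using h
          exact ⟨[], by simp [this], by simp⟩
        · rintro ⟨w, hw, hws⟩
          cases w with
          | nil => simp at hw; simp [hw]
          | cons w0 w' =>
            simp only [List.cons_append, List.cons.injEq] at hw
            have := hws w0 (by simp)
            rw [← hw.1] at this
            exact absurd this (by decide)
      · have hstep : pvStep PvSt.ws a = PvSt.reject := by
          simp [pvStep, hsp, hgt]
        rw [List.foldl_cons, hstep, pv_foldl_reject]
        simp only [pvAcc]
        constructor
        · intro h; cases h
        · rintro ⟨w, hw, hws⟩
          cases w with
          | nil => simp at hw; exact absurd (by simp [hw.1] : (a == '>') = true) (by simp [hgt])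
          | cons w0 w' =>
            simp only [List.cons_append, List.cons.injEq] at hw
            exact absurd (hw.1 ▸ hws w0 (by simp)) (by simp [hsp])

lemma pv_name_acc (l : List Char) :
    pvAcc (List.foldl pvStep PvSt.name l) = true ↔
      ∃ g w, l = g ++ w ++ ['>'] ∧ (∀ x ∈ g, pvGood x = true)
        ∧ ∀ x ∈ w, PySem.Chars.isspace x = true := by
  induction l with
  | nil =>
    simp [pvAcc]
  | cons a xs ih =>
    by_cases hg : pvGood a = true
    · have hstep : pvStep PvSt.name a = PvSt.name := by simp [pvStep, hg]
      rw [List.foldl_cons, hstep, ih]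
      constructor
      · rintro ⟨g, w, heq, hgs, hws⟩
        refine ⟨a :: g, w, by simp [heq], ?_, hws⟩
        intro x hx
        rcases List.mem_cons.mp hx with h | h
        · subst h; exact hg
        · exact hgs x h
      · rintro ⟨g, w, heq, hgs, hws⟩
        cases g with
        | nil =>
          cases w with
          | nil =>
            simp at heq
            rw [heq.1] at hg
            exact absurd hg (by decide)
          | cons w0 w' =>
            simp only [List.nil_append, List.cons_append, List.cons.injEq] at heq
            have := hws w0 (by simp)
            rw [← heq.1] at this
            exact absurd hg (by simp [pv_space_not_good a this])
        | cons g0 g' =>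
          simp only [List.cons_append, List.cons.injEq] at heq
          exact ⟨g', w, heq.2, fun x hx => hgs x (by simp [hx]), hws⟩
    · -- a not good: g is forced empty on the right-hand side
      have hforce : (∃ g w, a :: xs = g ++ w ++ ['>'] ∧ (∀ x ∈ g, pvGood x = true)
            ∧ ∀ x ∈ w, PySem.Chars.isspace x = true) ↔
          (∃ w, a :: xs = w ++ ['>'] ∧ ∀ x ∈ w, PySem.Chars.isspace x = true) := by
        constructor
        · rintro ⟨g, w, heq, hgs, hws⟩
          cases g with
          | nil => exact ⟨w, by simpa using heq, hws⟩
          | cons g0 g' =>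
            simp only [List.cons_append, List.cons.injEq] at heq
            exact absurd (heq.1 ▸ hgs g0 (by simp)) (by simp [hg])
        · rintro ⟨w, heq, hws⟩
          exact ⟨[], w, by simpa using heq, by simp, hws⟩
      rw [hforce]
      by_cases hsp : PySem.Chars.isspace a = true
      · have hstep : pvStep PvSt.name a = PvSt.ws := by simp [pvStep, hg, hsp]
        rw [List.foldl_cons, hstep]
        rw [pv_ws_acc]
        constructor
        · rintro ⟨w, hw, hws⟩
          refine ⟨a :: w, by simp [hw], ?_⟩
          intro x hx
          rcases List.mem_cons.mp hx with h | h
          · subst h; exact hsp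
          · exact hws x h
        · rintro ⟨w, hw, hws⟩
          cases w with
          | nil =>
            simp at hw
            rw [hw.1] at hsp
            exact absurd hsp (by decide)
          | cons w0 w' =>
            simp only [List.cons_append, List.cons.injEq] at hw
            exact ⟨w', hw.2, fun x hx => hws x (by simp [hx])⟩
      · by_cases hgt : (a == '>') = true
        · have haeq : a = '>' := by simpa using hgt
          subst haeq
          have hstep : pvStep PvSt.name '>' = PvSt.done := by
            simp [pvStep, hg, show PySem.Chars.isspace '>' = false by decide]
          rw [List.foldl_cons, hstep, pv_acc_done]
          constructor
          · intro h
            have : xs = [] := by simpa using h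
            exact ⟨[], by simp [this], by simp⟩
          · rintro ⟨w, hw, hws⟩
            cases w with
            | nil => simp at hw; simp [hw]
            | cons w0 w' =>
              simp only [List.cons_append, List.cons.injEq] at hw
              have := hws w0 (by simp)
              rw [← hw.1] at this
              exact absurd this (by decide)
        · have hstep : pvStep PvSt.name a = PvSt.reject := by simp [pvStep, hg, hsp, hgt]
          rw [List.foldl_cons, hstep, pv_foldl_reject]
          simp only [pvAcc]
          constructor
          · intro h; cases h
          · rintro ⟨w, hw, hws⟩
            cases w with
            | nil => simp at hw; exact absurd (by simp [hw.1] : (a == '>') = true) (by simp [hgt])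
            | cons w0 w' =>
              simp only [List.cons_append, List.cons.injEq] at hw
              exact absurd (hw.1 ▸ hws w0 (by simp)) (by simp [hsp])

-- boolean characterisation of acceptance from the name state
lemma pv_name_char (l : List Char) :
    pvAcc (List.foldl pvStep PvSt.name l)
      = (!l.isEmpty && (l.getLast? == some '>')
          && (l.dropLast.dropWhile pvGood).all PySem.Chars.isspace) := by
  have h1 : pvAcc (List.foldl pvStep PvSt.name l) = true ↔
      (!l.isEmpty && (l.getLast? == some '>')
        && (l.dropLast.dropWhile pvGood).all PySem.Chars.isspace) = true := by
    rw [pv_name_acc]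
    constructor
    · rintro ⟨g, w, heq, hgs, hws⟩
      subst heq
      have hass : g ++ w ++ ['>'] = (g ++ w) ++ ['>'] := by simp
      rw [hass]
      simp only [Bool.and_eq_true, Bool.not_eq_eq_eq_not]
      refine ⟨⟨by simp, by rw [List.getLast?_concat]; simp⟩, ?_⟩
      rw [List.dropLast_concat, List.dropWhile_append]
      have hgnil : g.dropWhile pvGood = [] := List.dropWhile_eq_nil_iff.mpr fun x hx => hgs x hx
      rw [hgnil]
      simp only [List.isEmpty_nil, if_pos rfl]
      have hwdw : w.dropWhile pvGood = w := by
        cases w with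
        | nil => rfl
        | cons w0 w' =>
          rw [List.dropWhile_cons, pv_space_not_good w0 (hws w0 (by simp))]
          simp
      rw [hwdw, List.all_eq_true]
      exact hws
    · intro h
      simp only [Bool.and_eq_true, Bool.not_eq_eq_eq_not, beq_iff_eq] at h
      obtain ⟨⟨hne, hlast⟩, hdw⟩ := h
      obtain ⟨l', hl'⟩ := List.getLast?_eq_some_iff.mp hlast
      subst hl'
      rw [List.dropLast_concat] at hdw
      refine ⟨l'.takeWhile pvGood, l'.dropWhile pvGood, by simp, ?_, ?_⟩
      · exact fun x hx => List.mem_takeWhile_imp hx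
      · exact fun x hx => List.all_eq_true.mp hdw x hx
  rcases Bool.eq_false_or_eq_true
      (!l.isEmpty && (l.getLast? == some '>')
        && (l.dropLast.dropWhile pvGood).all PySem.Chars.isspace) with hb | hb <;>
    simp [hb] at h1 ⊢ <;> simp [h1]

lemma pv_open_acc (l : List Char) (s : PvSt) (hs : s = PvSt.openOther ∨ s = PvSt.openGt) :
    pvAcc (List.foldl pvStep s l)
      = (if l.isEmpty then s == PvSt.openGt else l.getLast? == some '>') := by
  induction l generalizing s with
  | nil =>
    rcases hs with h | h <;> subst h <;> rfl
  | cons a xs ih =>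
    have hstep : pvStep s a = (if (a == '>') = true then PvSt.openGt else PvSt.openOther) := by
      rcases hs with h | h <;> subst h <;> by_cases hgt : (a == '>') = true <;> simp [pvStep, hgt]
    rw [List.foldl_cons, hstep]
    by_cases hgt : (a == '>') = true
    · rw [if_pos hgt, ih _ (Or.inr rfl)]
      cases xs with
      | nil => simpa using hgt
      | cons b ys => simp
    · rw [if_neg hgt, ih _ (Or.inl rfl)]
      cases xs with
      | nil =>
        have hgt' : (a == '>') = false := by simpa using hgt
        simp [hgt']
      | cons b ys => simp

-- ===== VERDICT (by name: the statement is the Claim_ definition above) =====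
theorem is_complete_html_tag_py_spec : Claim_equal_is_complete_html_tag_py := by
  intro content _hdom
  show is_complete_html_tag_py content = is_complete_html_tag_py_alt content
  simp only [is_complete_html_tag_py, is_complete_html_tag_py_alt]
  generalize PySem.Chars.rstrip content.toList = cs
  rcases cs with _ | ⟨a, _ | ⟨b, _ | ⟨c, tl⟩⟩⟩
  · rfl
  · by_cases ha : (a == '<') = true
    · have : a = '<' := by simpa using ha
      subst this
      simp [pvStep, pvAcc, pv_endswith_last?]
    · simp [pvStep, pvAcc, ha]
  · by_cases ha : (a == '<') = true
    · have : a = '<' := by simpa using ha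
      subst this
      by_cases hb : (b == '/') = true
      · have : b = '/' := by simpa using hb
        subst this
        simp [pvStep, pvAcc, pv_endswith_last?]
      · by_cases hob : PySem.Chars.isalpha b = true <;>
          simp [pvStep, pvAcc, pv_endswith_last?, hb, hob]
    · simp [pvStep, pvAcc, ha]
  · -- cs = a :: b :: c :: tl, length ≥ 3
    rw [pv_endswith_last?]
    simp only [List.getD_cons_zero, List.getD_cons_succ, List.length_cons,
      List.getLast?_cons_cons]
    by_cases ha : (a == '<') = true
    · have : a = '<' := by simpa using ha
      subst this
      have hstep0 : List.foldl pvStep PvSt.start ('<' :: b :: c :: tl)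
          = List.foldl pvStep PvSt.lt (b :: c :: tl) := by
        simp [pvStep]
      rw [hstep0]
      by_cases hb : (b == '/') = true
      · have : b = '/' := by simpa using hb
        subst this
        have hstep1 : List.foldl pvStep PvSt.lt ('/' :: c :: tl)
            = List.foldl pvStep PvSt.slash (c :: tl) := by
          simp [pvStep]
        rw [hstep1]
        by_cases hc : PySem.Chars.isalpha c = true
        · have hstep2 : List.foldl pvStep PvSt.slash (c :: tl)
              = List.foldl pvStep PvSt.name tl := by
            simp [pvStep, hc]
          rw [hstep2, pv_name_char]
          rcases tl with _ | ⟨d, tl'⟩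
          · -- cs = ['<','/',c]
            simp only [List.getLast?_singleton, List.isEmpty_nil, Bool.not_true]
            by_cases hcg : (c == '>') = true <;> simp [hcg]
          · -- tl = d :: tl'
            simp only [List.getLast?_cons_cons]
            by_cases hlast : ((d :: tl').getLast? == some '>') = true
            · -- endswith holds
              simp only [List.length_cons, Nat.add_sub_cancel, hlast, beq_self_eq_true,
                Bool.not_true, Bool.false_eq_true, if_false, if_true,
                if_neg (show ¬(tl'.length + 1 + 1 + 1 + 1 = 0) by omega),
                if_neg (show ¬(tl'.length + 1 + 1 + 1 + 1 < 3) by omega),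
                if_neg (show ¬(tl'.length + 1 + 1 + 1 + 1 < 4) by omega),
                hc]
              -- LHS: strip (cs[pos:-1]) == []
              have hneL : ('<' :: '/' :: c :: d :: tl') ≠ [] := by simp
              rw [pv_strip_nil_iff]
              have hple : pvTagScan ('<' :: '/' :: c :: d :: tl') (tl'.length + 1 + 1 + 1) 2
                  ≤ ('<' :: '/' :: c :: d :: tl').length - 1 := by
                have := pv_tagScan_le ('<' :: '/' :: c :: d :: tl')
                  (tl'.length + 1 + 1 + 1) 2 (by omega)
                simpa using this
              have hslA := pv_slice_neg_one ('<' :: '/' :: c :: d :: tl') _ hple hneL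
              simp only [List.length_cons, Nat.add_sub_cancel] at hslA
              rw [hslA]
              have hdrop := pv_tagScan_drop ('<' :: '/' :: c :: d :: tl')
                (tl'.length + 1 + 1 + 1) 2 (by simp) (by omega)
              rw [hdrop]
              -- (take (len-1)).drop 2 = c :: (d::tl').dropLast
              have htk : (('<' :: '/' :: c :: d :: tl').take (tl'.length + 1 + 1 + 1)).drop 2
                  = c :: (d :: tl').dropLast := by
                simp only [List.take_succ_cons, List.drop_succ_cons, List.drop_zero,
                  List.dropLast_eq_take]
                simp
              rw [htk, List.dropWhile_cons, pv_alpha_good c hc, if_pos rfl]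
              simp
            · -- endswith fails: both sides false
              have hlast' : ((d :: tl').getLast? == some '>') = false := by
                simpa using hlast
              simp [hlast']
        · -- c not alpha: A short-circuits, B rejects
          have hstep2 : List.foldl pvStep PvSt.slash (c :: tl)
              = PvSt.reject := by
            simp [pvStep, hc, pv_foldl_reject]
          rw [hstep2]
          simp only [pvAcc]
          split_ifs with h1 h2 h3 h4 <;> simp_all
      · -- opening tag: b ≠ '/'
        by_cases hob : PySem.Chars.isalpha b = true
        · have hstep1 : List.foldl pvStep PvSt.lt (b :: c :: tl)
              = List.foldl pvStep PvSt.openOther (c :: tl) := by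
            simp [pvStep, hb, hob]
          rw [hstep1, pv_open_acc _ _ (Or.inl rfl)]
          simp only [List.isEmpty_cons, Bool.false_eq_true, if_false]
          by_cases hlast : ((c :: tl).getLast? == some '>') = true <;>
            simp [hlast, hb, hob]
        · have hstep1 : List.foldl pvStep PvSt.lt (b :: c :: tl) = PvSt.reject := by
            simp [pvStep, hb, hob, pv_foldl_reject]
          rw [hstep1]
          simp only [pvAcc]
          split_ifs with h1 h2 <;> simp_all
    · -- a ≠ '<'
      have : ¬ a = '<' := by simpa using ha
      have hstep0 : List.foldl pvStep PvSt.start (a :: b :: c :: tl) = PvSt.reject := by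
        simp [pvStep, ha, pv_foldl_reject]
      rw [hstep0]
      simp [ha, pvAcc]
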